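-- pv_equiv track=rewrite | github.com/dmreiland/Ripsnort | utils/string_match.py | distanceBetweenStrings
-- ===== SOURCE A (Python) =====
-- def distanceBetweenStrings(needle, haystack):
--
--     """Calculates the fuzzy match of needle in haystack,
--     using a modified version of the Levenshtein distance
--     algorithm.
--     The function is modified from the levenshtein function
--     in the bktree module by Adam Hupp"""
--
--     doesLevenshteinModuleExist = False
--
--     m, n = len(needle), len(haystack)
--
--     # base cases
--     if m == 1:
--         return not needle in haystack
--     if not n:
--         return m
--
--     row1 = [0] * (n+1)
--     for i in range(0,m):
--         row2 = [i+1]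
--         for j in range(0,n):
--             cost = ( needle[i] != haystack[j] )
--
--             row2.append( min(row1[j+1]+1, # deletion
--                                row2[j]+1, #insertion
--                                row1[j]+cost) #substitution
--                            )
--         row1 = row2
--     return min(row1)
-- ===== SOURCE B (Python) =====
-- def distanceBetweenStrings(needle, haystack):
--     """Top-down memoized recursion on the index pair (k, j):
--     d(0,j)=0, d(k,0)=k, d(k,j)=min(d(k-1,j)+1, d(k,j-1)+1,
--     d(k-1,j-1)+(needle[k-1]!=haystack[j-1])); answer = min over j of d(m,j),
--     kept as a running minimum.  The memo is keyed by the flat index k*(n+1)+j.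
--     The anchor calls d(k, j) at every 500th k only bound the recursion depth
--     (they change no value); they keep the lazy evaluation inside Python's
--     default recursion limit."""
--     m, n = len(needle), len(haystack)
--     memo = {}
--     W = n + 1
--
--     def d(k, j):
--         v = memo.get(k * W + j)
--         if v is not None:
--             return v
--         if k == 0:
--             v = 0
--         elif j == 0:
--             v = k
--         else:
--             v = min(d(k - 1, j) + 1,
--                     d(k, j - 1) + 1,
--                     d(k - 1, j - 1) + (needle[k - 1] != haystack[j - 1]))
--         memo[k * W + j] = v
--         return v
--
--     best = None
--     for j in range(n + 1):
--         for k in range(0, m + 1, 500):   # depth anchors, one column at a time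
--             d(k, j)
--         v = d(m, j)
--         if best is None or v < best:
--             best = v
--     return best
-- ===== Notes on version B (the rewrite author's own statement) =====
-- stated objective: alternative
-- what changed: A fills an iterative bottom-up DP table row by row over the needle and takes min() of the final row; B is top-down memoized recursion on the index pair (k, j) with a memo dict (flat key k*(n+1)+j) and a running minimum of d(m, j), computing cells on demand (with periodic anchor calls only to bound recursion depth).
-- outside the precondition, e.g. on distanceBetweenStrings('a', 'a'): A returns False, B returns 0; on distanceBetweenStrings('a', 'bc'): A returns True, B returns 1
import Mathlib
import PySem

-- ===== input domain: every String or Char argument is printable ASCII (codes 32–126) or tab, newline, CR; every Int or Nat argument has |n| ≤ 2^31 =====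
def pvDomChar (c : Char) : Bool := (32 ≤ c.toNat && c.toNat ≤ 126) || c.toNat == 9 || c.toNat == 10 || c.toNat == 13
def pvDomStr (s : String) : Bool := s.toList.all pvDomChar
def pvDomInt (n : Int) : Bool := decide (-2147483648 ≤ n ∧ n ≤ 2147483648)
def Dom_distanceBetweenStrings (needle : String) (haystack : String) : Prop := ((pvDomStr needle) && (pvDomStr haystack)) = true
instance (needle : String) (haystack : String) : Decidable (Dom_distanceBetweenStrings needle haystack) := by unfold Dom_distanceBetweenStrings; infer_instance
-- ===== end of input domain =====

-- B replaces A's bottom-up row-by-row DP table (plus final min-scan) by top-down memoized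
-- recursion on the index pair (k, j) with a memo dict and a running minimum of d(m, j);
-- same value, same cost class (objective: alternative decomposition).

-- ===== PORT A =====
-- literal transliteration of A: special cases, then row-wise DP over range(m)/range(n), then min(row1)
def distanceBetweenStrings (needle : String) (haystack : String) : Int :=
  let nd := needle.toList
  let hs := haystack.toList
  let m := nd.length
  let n := hs.length
  if m = 1 then (if PySem.Chars.isIn nd hs then 0 else 1)   -- `not needle in haystack` (bool → 0/1)
  else if n = 0 then (m : Int)
  else
    let row1 : List Int := List.replicate (n+1) 0
    let row1 := (List.range m).foldl (fun (row1 : List Int) (i : Nat) =>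
      let row2 : List Int := [(i : Int) + 1]
      let row2 := (List.range n).foldl (fun (row2 : List Int) (j : Nat) =>
        let cost : Int := if nd.getD i ' ' ≠ hs.getD j ' ' then 1 else 0
        row2 ++ [min (min (row1.getD (j+1) 0 + 1) (row2.getD j 0 + 1)) (row1.getD j 0 + cost)]) row2
      row2) row1
    (PySem.List.min? row1 (fun v => v)).getD 0              -- min(row1); row1 is nonempty here

-- ===== PORT B =====
-- Source B's inner `def d(k, j)`: memo.get on the flat key k*W+j, the two bases, else the three
-- recursive calls (threaded through the memo dict in Python's left-to-right evaluation
-- order), then store under k*W+j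
def dmemo (nd hs : List Char) (W : Nat) (k j : Nat) (memo : PySem.Dict Nat Int) :
    Int × PySem.Dict Nat Int :=
  match PySem.Dict.get? memo (k * W + j) with
  | some v => (v, memo)
  | none =>
    if _hk : k = 0 then ((0 : Int), memo.insert (k * W + j) 0)
    else if _hj : j = 0 then ((k : Int), memo.insert (k * W + j) (k : Int))
    else
      let r1 := dmemo nd hs W (k-1) j memo
      let r2 := dmemo nd hs W k (j-1) r1.2
      let r3 := dmemo nd hs W (k-1) (j-1) r2.2
      let v := min (min (r1.1 + 1) (r2.1 + 1))
        (r3.1 + (if nd.getD (k-1) ' ' ≠ hs.getD (j-1) ' ' then 1 else 0))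
      (v, r3.2.insert (k * W + j) v)
  termination_by (k, j)
  decreasing_by
  · exact Prod.Lex.left _ _ (by omega)
  · exact Prod.Lex.right _ (by omega)
  · exact Prod.Lex.left _ _ (by omega)

-- literal transliteration of Source B's driver: W = n+1, then per column j the depth-anchor
-- calls at every 500th k (values discarded), then d(m, j) into the running minimum
def distanceBetweenStrings_alt (needle : String) (haystack : String) : Int :=
  let nd := needle.toList
  let hs := haystack.toList
  let m := nd.length
  let n := hs.length
  let st := (List.range (n+1)).foldl
    (fun (st : Option Int × PySem.Dict Nat Int) j =>
      let memo := (List.range (m / 500 + 1)).foldl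
        (fun memo t => (dmemo nd hs (n+1) (500 * t) j memo).2) st.2   -- range(0, m+1, 500)
      let r := dmemo nd hs (n+1) m j memo
      let best : Option Int :=
        match st.1 with
        | none => some r.1
        | some b => if r.1 < b then some r.1 else some b
      (best, r.2)) (none, PySem.Dict.empty)
  st.1.getD 0            -- best is some _ here: the j-loop runs at least once

-- ===== PRECONDITION & SPEC =====
-- Pre_ excludes needles of length 1, the only inputs where A returns a bool (`not needle in haystack`) instead of an int; B returns the same quantity as an int there (0 for found, 1 for not found).
def Pre_distanceBetweenStrings (needle : String) (haystack : String) : Prop := needle.toList.length ≠ 1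
instance (needle : String) (haystack : String) : Decidable (Pre_distanceBetweenStrings needle haystack) := by unfold Pre_distanceBetweenStrings; infer_instance
def pvWitness_distanceBetweenStrings : String × String := ("ab", "xaby")
def Spec_distanceBetweenStrings (needle : String) (haystack : String) (out : Int) : Prop := out = distanceBetweenStrings_alt needle haystack
instance (needle : String) (haystack : String) (out : Int) : Decidable (Spec_distanceBetweenStrings needle haystack out) := by unfold Spec_distanceBetweenStrings; infer_instance

-- ===== CLAIM (what is proved, stated in full; the proofs are below) =====
def Claim_equal_distanceBetweenStrings : Prop := ∀ (needle : String) (haystack : String), Dom_distanceBetweenStrings needle haystack → Pre_distanceBetweenStrings needle haystack → Spec_distanceBetweenStrings needle haystack (distanceBetweenStrings needle haystack)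

-- ===== LEMMAS AND PROOFS =====

-- the common mathematical DP table: levD nd hs i j = fuzzy edit distance of nd[:i] into a substring ending at j
def levD (nd : List Char) (hs : List Char) : Nat → Nat → Int
  | 0, _ => 0
  | i+1, 0 => (i : Int) + 1
  | i+1, j+1 => min (min (levD nd hs i (j+1) + 1) (levD nd hs (i+1) j + 1))
      (levD nd hs i j + (if nd.getD i ' ' ≠ hs.getD j ' ' then 1 else 0))

-- running minimum of levD nd.length · over 0..j
def bmin (nd : List Char) (hs : List Char) : Nat → Int
  | 0 => (nd.length : Int)
  | j+1 => min (bmin nd hs j) (levD nd hs nd.length (j+1))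

theorem levD_zero_left (nd hs : List Char) (j : Nat) : levD nd hs 0 j = 0 := by
  cases j <;> simp [levD]

theorem levD_zero_right (nd hs : List Char) (i : Nat) : levD nd hs i 0 = (i : Int) := by
  cases i <;> simp [levD]

theorem levD_succ_succ (nd hs : List Char) (i j : Nat) :
    levD nd hs (i+1) (j+1) = min (min (levD nd hs i (j+1) + 1) (levD nd hs (i+1) j + 1))
      (levD nd hs i j + (if nd.getD i ' ' ≠ hs.getD j ' ' then 1 else 0)) := by
  simp [levD]

theorem bmin_succ (nd hs : List Char) (j : Nat) :
    bmin nd hs (j+1) = min (bmin nd hs j) (levD nd hs nd.length (j+1)) := by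
  simp [bmin]

-- A's inner loop has this shape: fold a new row out of the previous one
theorem inner_inv (prev : List Int) (P Q c : Nat → Int) (s : Int) (k : Nat)
    (hprev : ∀ t, t ≤ k → prev.getD t 0 = P t)
    (hQ0 : Q 0 = s)
    (hQ : ∀ t, t < k → Q (t+1) = min (min (P (t+1) + 1) (Q t + 1)) (P t + c t)) :
    (List.range k).foldl (fun acc t =>
      acc ++ [min (min (prev.getD (t+1) 0 + 1) (acc.getD t 0 + 1)) (prev.getD t 0 + c t)]) [s]
    = (List.range (k+1)).map Q := by
  suffices H : ∀ j, j ≤ k → (List.range j).foldl (fun acc t =>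
      acc ++ [min (min (prev.getD (t+1) 0 + 1) (acc.getD t 0 + 1)) (prev.getD t 0 + c t)]) [s]
      = (List.range (j+1)).map Q from H k le_rfl
  intro j
  induction j with
  | zero => intro _; simp [hQ0]
  | succ j ih =>
    intro h
    rw [List.range_succ, List.foldl_append, ih (by omega)]
    simp only [List.foldl_cons, List.foldl_nil]
    rw [List.range_succ (n := j+1), List.map_append]
    rw [PySem.List.getD_map_range Q (j+1) j 0 (by omega)]
    rw [hprev (j+1) h, hprev j (by omega)]
    simp [hQ j (by omega)]

-- A's outer loop builds the rows of levD
theorem A_rows (nd hs : List Char) (i : Nat) :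
    (List.range i).foldl (fun (row1 : List Int) (i : Nat) =>
      let row2 : List Int := [(i : Int) + 1]
      let row2 := (List.range hs.length).foldl (fun (row2 : List Int) (j : Nat) =>
        let cost : Int := if nd.getD i ' ' ≠ hs.getD j ' ' then 1 else 0
        row2 ++ [min (min (row1.getD (j+1) 0 + 1) (row2.getD j 0 + 1)) (row1.getD j 0 + cost)]) row2
      row2) (List.replicate (hs.length+1) 0)
    = (List.range (hs.length+1)).map (fun j => levD nd hs i j) := by
  induction i with
  | zero =>
    simp only [List.range_zero, List.foldl_nil]
    have h0 : (fun j => levD nd hs 0 j) = fun _ : Nat => (0 : Int) := by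
      funext j; exact levD_zero_left nd hs j
    rw [h0, List.map_const', List.length_range]
  | succ i ih =>
    rw [List.range_succ, List.foldl_append, ih]
    simp only [List.foldl_cons, List.foldl_nil]
    exact inner_inv _ (fun j => levD nd hs i j) (fun j => levD nd hs (i+1) j) _ _ _
      (fun t _ => PySem.List.getD_map_range _ _ _ _ (by omega))
      (by show levD nd hs (i+1) 0 = (i : Int) + 1
          rw [levD_zero_right]; push_cast; ring)
      (fun t _ => levD_succ_succ nd hs i t)

-- value of Python's min() on a cons list
theorem min?_cons (x : Int) (xs : List Int) :
    PySem.List.min? (x :: xs) (fun v => v) = some (xs.foldl min x) := by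
  show List.foldl _ (some x) xs = _
  induction xs generalizing x with
  | nil => rfl
  | cons y ys ih =>
    simp only [List.foldl_cons]
    have h : (if y < x then some y else some x) = some (min x y) := by
      split_ifs with h <;> simp [min_def] <;> omega
    rw [h, ih]

theorem foldl_min_bmin (nd hs : List Char) (j : Nat) :
    ((List.range j).map (fun t => levD nd hs nd.length (t+1))).foldl min (levD nd hs nd.length 0)
    = bmin nd hs j := by
  induction j with
  | zero => simp [bmin, levD_zero_right]
  | succ j ih =>
    rw [List.range_succ, List.map_append, List.foldl_append, ih, bmin_succ]
    rfl

theorem minA (nd hs : List Char) (n : Nat) :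
    (PySem.List.min? ((List.range (n+1)).map (fun j => levD nd hs nd.length j)) (fun v => v)).getD 0
    = bmin nd hs n := by
  rw [List.range_succ_eq_map, List.map_cons, min?_cons, List.map_map]
  simp only [Option.getD_some]
  have h : ((fun j => levD nd hs nd.length j) ∘ Nat.succ) = fun t => levD nd hs nd.length (t+1) := rfl
  rw [h]
  exact foldl_min_bmin nd hs n

-- ---- B side: the memo dict is correct wherever it is filled ----
-- (flat keys k*W+j with j < W decode uniquely)
def MemoInv (nd hs : List Char) (W : Nat) (memo : PySem.Dict Nat Int) : Prop :=
  ∀ k j v, j < W → PySem.Dict.get? memo (k * W + j) = some v → v = levD nd hs k j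

theorem MemoInv_empty (nd hs : List Char) (W : Nat) : MemoInv nd hs W PySem.Dict.empty := by
  intro k j v _ h
  rw [PySem.Dict.get?_empty] at h
  exact absurd h (by simp)

theorem key_decode (W k j k' j' : Nat) (hj : j < W) (hj' : j' < W)
    (h : k' * W + j' = k * W + j) : k' = k ∧ j' = j := by
  have hjm : j' = j := by
    have h1 : (k' * W + j') % W = j' := by rw [Nat.mul_comm, Nat.mul_add_mod]; exact Nat.mod_eq_of_lt hj'
    have h2 : (k * W + j) % W = j := by rw [Nat.mul_comm, Nat.mul_add_mod]; exact Nat.mod_eq_of_lt hj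
    rw [← h1, h, h2]
  refine ⟨?_, hjm⟩
  have hk : k' * W = k * W := by omega
  exact Nat.eq_of_mul_eq_mul_right (by omega) hk

theorem MemoInv_insert (nd hs : List Char) (W : Nat) (memo : PySem.Dict Nat Int)
    (k j : Nat) (v : Int) (hj : j < W) (hm : MemoInv nd hs W memo)
    (hv : v = levD nd hs k j) : MemoInv nd hs W (memo.insert (k * W + j) v) := by
  intro k' j' v' hj' h
  rw [PySem.Dict.get?_insert] at h
  by_cases he : k' * W + j' = k * W + j
  · rw [if_pos he] at h
    obtain ⟨h1, h2⟩ := key_decode W k j k' j' hj hj' he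
    subst h1; subst h2
    injection h with h; omega
  · rw [if_neg he] at h
    exact hm k' j' v' hj' h

-- the memoized recursion computes levD and keeps the memo correct
theorem dmemo_spec (nd hs : List Char) (W : Nat) (s : Nat) :
    ∀ (k j : Nat) (memo : PySem.Dict Nat Int), k + j ≤ s → j < W → MemoInv nd hs W memo →
      (dmemo nd hs W k j memo).1 = levD nd hs k j ∧
        MemoInv nd hs W (dmemo nd hs W k j memo).2 := by
  induction s with
  | zero =>
    intro k j memo hle hj hm
    have hk : k = 0 := by omega
    have hj0 : j = 0 := by omega
    subst hk; subst hj0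
    rw [dmemo]
    cases hget : PySem.Dict.get? memo (0 * W + 0) with
    | some v => exact ⟨hm 0 0 v hj hget, hm⟩
    | none =>
      refine ⟨(levD_zero_left nd hs 0).symm, ?_⟩
      exact MemoInv_insert nd hs W memo 0 0 0 hj hm (levD_zero_left nd hs 0).symm
  | succ s ih =>
    intro k j memo hle hj hm
    rw [dmemo]
    cases hget : PySem.Dict.get? memo (k * W + j) with
    | some v => exact ⟨hm k j v hj hget, hm⟩
    | none =>
      by_cases hk : k = 0
      · rw [dif_pos hk]
        subst hk
        exact ⟨(levD_zero_left nd hs j).symm,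
          MemoInv_insert nd hs W memo 0 j 0 hj hm (levD_zero_left nd hs j).symm⟩
      · rw [dif_neg hk]
        by_cases hj0 : j = 0
        · rw [dif_pos hj0]
          subst hj0
          exact ⟨(levD_zero_right nd hs k).symm,
            MemoInv_insert nd hs W memo k 0 (k : Int) hj hm (levD_zero_right nd hs k).symm⟩
        · rw [dif_neg hj0]
          obtain ⟨k', rfl⟩ := Nat.exists_eq_succ_of_ne_zero hk
          obtain ⟨j', rfl⟩ := Nat.exists_eq_succ_of_ne_zero hj0
          have h1 := ih k' (j'+1) memo (by omega) hj hm
          have h2 := ih (k'+1) j' (dmemo nd hs W k' (j'+1) memo).2 (by omega) (by omega) h1.2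
          have h3 := ih k' j' (dmemo nd hs W (k'+1) j' (dmemo nd hs W k' (j'+1) memo).2).2
            (by omega) (by omega) h2.2
          simp only [Nat.succ_eq_add_one, Nat.add_sub_cancel]
          refine ⟨?_, ?_⟩
          · rw [h1.1, h2.1, h3.1, levD_succ_succ]
          · exact MemoInv_insert nd hs W _ (k'+1) (j'+1) _ hj h3.2
              (by rw [h1.1, h2.1, h3.1, levD_succ_succ])

-- the anchor calls change no value: they only keep the memo correct
theorem warm_inv (nd hs : List Char) (W j : Nat) (hj : j < W) (l : List Nat) :
    ∀ memo, MemoInv nd hs W memo →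
      MemoInv nd hs W (l.foldl (fun memo t => (dmemo nd hs W (500 * t) j memo).2) memo) := by
  induction l with
  | nil => intro memo hm; exact hm
  | cons t l ih =>
    intro memo hm
    exact ih _ ((dmemo_spec nd hs W (500 * t + j) (500 * t) j memo le_rfl hj hm).2)

-- B's driver fold, its step function named so the unfolding stays readable
def Bstep (nd hs : List Char) (st : Option Int × PySem.Dict Nat Int) (j : Nat) :
    Option Int × PySem.Dict Nat Int :=
  let memo := (List.range (nd.length / 500 + 1)).foldl
    (fun memo t => (dmemo nd hs (hs.length + 1) (500 * t) j memo).2) st.2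
  let r := dmemo nd hs (hs.length + 1) nd.length j memo
  let best : Option Int :=
    match st.1 with
    | none => some r.1
    | some b => if r.1 < b then some r.1 else some b
  (best, r.2)

-- after t columns, best = bmin (t-1) and the memo is correct
theorem B_fold (nd hs : List Char) (t : Nat) (ht : t ≤ hs.length + 1) :
    ∃ memo, (List.range t).foldl (Bstep nd hs) (none, PySem.Dict.empty)
        = (if t = 0 then none else some (bmin nd hs (t-1)), memo) ∧
      MemoInv nd hs (hs.length + 1) memo := by
  induction t with
  | zero => exact ⟨PySem.Dict.empty, rfl, MemoInv_empty nd hs _⟩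
  | succ t ih =>
    obtain ⟨memo, hEq, hInv⟩ := ih (by omega)
    rw [List.range_succ, List.foldl_append, hEq]
    simp only [List.foldl_cons, List.foldl_nil]
    have hj : t < hs.length + 1 := by omega
    have hwarm := warm_inv nd hs (hs.length + 1) t hj (List.range (nd.length / 500 + 1)) memo hInv
    have hd := dmemo_spec nd hs (hs.length + 1) (nd.length + t) nd.length t _ le_rfl hj hwarm
    refine ⟨_, ?_, hd.2⟩
    cases t with
    | zero =>
      show Bstep nd hs (none, memo) 0 = _
      unfold Bstep
      simp only [Nat.add_sub_cancel]
      rw [hd.1, levD_zero_right]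
      rfl
    | succ t' =>
      show Bstep nd hs (some (bmin nd hs t'), memo) (t'+1) = _
      unfold Bstep
      simp only [Nat.add_sub_cancel]
      rw [hd.1, bmin_succ]
      rcases lt_or_ge (levD nd hs nd.length (t'+1)) (bmin nd hs t') with h | h
      · rw [if_pos h]
        have : min (bmin nd hs t') (levD nd hs nd.length (t'+1)) = levD nd hs nd.length (t'+1) := by omega
        rw [this]
        rfl
      · rw [if_neg (by omega)]
        have : min (bmin nd hs t') (levD nd hs nd.length (t'+1)) = bmin nd hs t' := by omega
        rw [this]
        rfl

-- B computes bmin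
theorem B_eq (needle haystack : String) :
    distanceBetweenStrings_alt needle haystack
      = bmin needle.toList haystack.toList haystack.toList.length := by
  obtain ⟨memo, hEq, -⟩ := B_fold needle.toList haystack.toList
    (haystack.toList.length + 1) le_rfl
  show ((List.range (haystack.toList.length + 1)).foldl
      (Bstep needle.toList haystack.toList) (none, PySem.Dict.empty)).1.getD 0 = _
  rw [hEq]
  rfl

-- A computes bmin in every branch admitted by Pre_
theorem A_eq (needle haystack : String) (h1 : needle.toList.length ≠ 1) :
    distanceBetweenStrings needle haystack
      = bmin needle.toList haystack.toList haystack.toList.length := by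
  unfold distanceBetweenStrings
  rw [if_neg h1]
  by_cases h0 : haystack.toList.length = 0
  · rw [if_pos h0, h0]; rfl
  · rw [if_neg h0]
    show (PySem.List.min? _ (fun v => v)).getD 0 = _
    rw [A_rows needle.toList haystack.toList needle.toList.length]
    exact minA _ _ _

-- ===== VERDICT (by name: the statement is the Claim_ definition above) =====
theorem distanceBetweenStrings_spec : Claim_equal_distanceBetweenStrings := by
  intro needle haystack _ hpre
  show distanceBetweenStrings needle haystack = distanceBetweenStrings_alt needle haystack
  rw [A_eq needle haystack hpre, B_eq]
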